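-- pv_equiv track=rewrite | github.com/quan16369/Nemotron-Kaggle | nemotron/export_winning_snapshot_delta_csv.py | assign_length_buckets
-- ===== SOURCE A (Python) =====
-- def assign_length_buckets(values: list[int], num_buckets: int) -> list[int]:
--     if not values:
--         return []
--     if len(values) == 1 or len(set(values)) == 1:
--         return [0] * len(values)
--
--     ordered = sorted(range(len(values)), key=lambda idx: (values[idx], idx))
--     buckets = [0] * len(values)
--     bucket_count = min(num_buckets, len(values))
--     for rank, original_idx in enumerate(ordered):
--         buckets[original_idx] = min(bucket_count - 1, (rank * bucket_count) // len(values))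
--     return buckets
-- ===== SOURCE B (Python) =====
-- def assign_length_buckets(values: list[int], num_buckets: int) -> list[int]:
--     if not values:
--         return []
--     if len(values) == 1 or len(set(values)) == 1:
--         return [0] * len(values)
--
--     n = len(values)
--     ordered = sorted(range(n), key=lambda idx: (values[idx], idx))
--     bucket_count = min(num_buckets, n)
--     buckets = [0] * n
--     # Bucket 0 is the default; walk the remaining buckets and stamp their rank range.
--     for b in range(1, bucket_count):
--         lo = -((-(b * n)) // bucket_count)        # ceil(b*n/bucket_count)
--         hi = -((-((b + 1) * n)) // bucket_count)  # ceil((b+1)*n/bucket_count)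
--         for r in range(lo, hi):
--             buckets[ordered[r]] = b
--     return buckets
-- ===== Notes on version B (the rewrite author's own statement) =====
-- stated objective: alternative
-- what changed: Instead of computing min(bucket_count-1, rank*bucket_count//n) for every rank, B inverts the formula: it loops over buckets 1..bucket_count-1 and stamps each bucket b onto the slice of sorted ranks [ceil(b*n/bc), ceil((b+1)*n/bc)), bucket 0 being the array's initial value.
-- outside the precondition, e.g. on assign_length_buckets([1, 2], 0): A returns [-1, -1], B returns [0, 0]; on assign_length_buckets([1, 2, 3], -2): A returns [-3, -3, -3], B returns [0, 0, 0]
import Mathlib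
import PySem

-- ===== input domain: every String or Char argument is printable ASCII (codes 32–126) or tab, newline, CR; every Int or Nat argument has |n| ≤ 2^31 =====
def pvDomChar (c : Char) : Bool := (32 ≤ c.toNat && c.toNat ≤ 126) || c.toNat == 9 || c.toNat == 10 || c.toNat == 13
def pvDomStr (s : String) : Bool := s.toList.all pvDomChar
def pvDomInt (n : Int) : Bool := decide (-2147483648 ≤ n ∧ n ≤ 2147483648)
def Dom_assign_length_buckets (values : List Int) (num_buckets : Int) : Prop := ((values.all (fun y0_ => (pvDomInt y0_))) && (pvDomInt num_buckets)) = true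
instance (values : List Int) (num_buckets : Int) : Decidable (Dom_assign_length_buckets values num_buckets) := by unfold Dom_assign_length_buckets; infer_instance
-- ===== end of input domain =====

-- B assigns buckets by stamping each bucket's rank range instead of computing a per-rank formula; same cost, different decomposition.

-- ===== PORT A =====
-- values[idx] inside the sort key is always in range (idx ∈ range(len(values))); ported with pyGetD.
def assign_length_buckets (values : List Int) (num_buckets : Int) : List Int :=
  if values = [] then []
  else if values.length = 1 ∨ (PySem.Set.ofList values).length = 1 then
    List.replicate values.length 0
  else
    let ordered := PySem.List.sorted2 (PySem.List.pyRange 0 (values.length : Int) 1)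
      (fun idx => PySem.List.pyGetD values idx 0) (fun idx => idx) false
    let buckets := List.replicate values.length (0 : Int)
    let bc := min num_buckets (values.length : Int)
    (PySem.List.enumerate ordered 0).foldl
      (fun acc p =>
        PySem.List.pySetD acc p.2 (min (bc - 1) (PySem.Int.floordiv (p.1 * bc) (values.length : Int))))
      buckets

-- ===== PORT B =====
def assign_length_buckets_alt (values : List Int) (num_buckets : Int) : List Int :=
  if values = [] then []
  else if values.length = 1 ∨ (PySem.Set.ofList values).length = 1 then
    List.replicate values.length 0
  else
    let n : Int := (values.length : Int)
    let ordered := PySem.List.sorted2 (PySem.List.pyRange 0 n 1)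
      (fun idx => PySem.List.pyGetD values idx 0) (fun idx => idx) false
    let bc := min num_buckets n
    let buckets := List.replicate values.length (0 : Int)
    (PySem.List.pyRange 1 bc 1).foldl
      (fun acc b =>
        (PySem.List.pyRange (-(PySem.Int.floordiv (-(b * n)) bc))
            (-(PySem.Int.floordiv (-((b + 1) * n)) bc)) 1).foldl
          (fun acc2 r => PySem.List.pySetD acc2 (PySem.List.pyGetD ordered r 0) b) acc)
      buckets

-- ===== PRECONDITION & SPEC =====
-- Pre_ excludes num_buckets < 1 (outside the task's natural domain), where A's negative
-- bucket indices such as [-1, -1] are an artefact of the clamp arithmetic.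
def Pre_assign_length_buckets (values : List Int) (num_buckets : Int) : Prop := 1 ≤ num_buckets
instance (values : List Int) (num_buckets : Int) : Decidable (Pre_assign_length_buckets values num_buckets) := by unfold Pre_assign_length_buckets; infer_instance
def pvWitness_assign_length_buckets : List Int × Int := ([3, 1, 2, 1], 2)
def Spec_assign_length_buckets (values : List Int) (num_buckets : Int) (out : List Int) : Prop := out = assign_length_buckets_alt values num_buckets
instance (values : List Int) (num_buckets : Int) (out : List Int) : Decidable (Spec_assign_length_buckets values num_buckets out) := by unfold Spec_assign_length_buckets; infer_instance

-- ===== CLAIM (what is proved, stated in full; the proofs are below) =====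
def Claim_equal_assign_length_buckets : Prop := ∀ (values : List Int) (num_buckets : Int), Dom_assign_length_buckets values num_buckets → Pre_assign_length_buckets values num_buckets → Spec_assign_length_buckets values num_buckets (assign_length_buckets values num_buckets)

-- ===== LEMMAS AND PROOFS =====

-- ceil(b*N/bc) as B computes it
def pvCeil (b N bc : Int) : Int := -(PySem.Int.floordiv (-(b * N)) bc)

theorem pvCeil_bracket {N bc : Int} (hbc : 0 < bc) (b : Int) :
    (pvCeil b N bc - 1) * bc < b * N ∧ b * N ≤ pvCeil b N bc * bc := by
  have := (PySem.Int.neg_floordiv_neg_eq_iff_of_pos (a := b * N) (b := bc)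
    (q := pvCeil b N bc) hbc).mp rfl
  exact this

theorem pvCeil_le_iff {N bc : Int} (hbc : 0 < bc) (b r : Int) :
    pvCeil b N bc ≤ r ↔ b * N ≤ r * bc := by
  obtain ⟨h1, h2⟩ := pvCeil_bracket (N := N) hbc b
  constructor
  · intro h
    exact le_trans h2 (mul_le_mul_of_nonneg_right h (le_of_lt hbc))
  · intro h
    by_contra hc
    push_neg at hc
    have : r ≤ pvCeil b N bc - 1 := by omega
    have : r * bc ≤ (pvCeil b N bc - 1) * bc :=
      mul_le_mul_of_nonneg_right this (le_of_lt hbc)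
    omega

theorem pvCeil_mono {N bc : Int} (hbc : 0 < bc) (hN : 0 ≤ N) {b b' : Int} (h : b ≤ b') :
    pvCeil b N bc ≤ pvCeil b' N bc := by
  rw [pvCeil_le_iff hbc]
  calc b * N ≤ b' * N := mul_le_mul_of_nonneg_right h hN
    _ ≤ pvCeil b' N bc * bc := (pvCeil_bracket (N := N) hbc b').2

theorem pvCeil_bc {N bc : Int} (hbc : 0 < bc) : pvCeil bc N bc = N := by
  rw [pvCeil]
  rw [PySem.Int.neg_floordiv_neg_eq_iff_of_pos hbc]
  constructor
  · nlinarith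
  · nlinarith

-- in the rank range of bucket b, A's formula gives exactly b
theorem pvFdiv_eq_of_range {N bc b r : Int} (hbc : 0 < bc) (hN : 0 < N)
    (h1 : pvCeil b N bc ≤ r) (h2 : r < pvCeil (b + 1) N bc) :
    PySem.Int.floordiv (r * bc) N = b := by
  rw [PySem.Int.floordiv_eq_iff_of_pos hN]
  constructor
  · rw [pvCeil_le_iff hbc] at h1; linarith [h1]
  · have : ¬ pvCeil (b + 1) N bc ≤ r := by omega
    rw [pvCeil_le_iff hbc] at this
    push_neg at this
    linarith [this]

-- writing 0 anywhere into the all-zero list is the identity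
theorem pvSetD_replicate_zero (n : Nat) (i : Int) :
    PySem.List.pySetD (List.replicate n (0 : Int)) i 0 = List.replicate n 0 := by
  simp only [PySem.List.pySetD, PySem.List.pySet?]
  cases h : PySem.List.pyIdx? (List.replicate n (0 : Int)).length i with
  | none => simp
  | some k =>
    simp only [Option.map_some, Option.getD_some]
    apply List.ext_getElem (by simp)
    intro j hj hj'
    simp [List.getElem_set]

theorem pvFold_zero (ord : List Int) (l : List Int) (n : Nat) :
    l.foldl (fun acc j => PySem.List.pySetD acc (PySem.List.pyGetD ord j 0) 0)
      (List.replicate n (0 : Int)) = List.replicate n 0 := by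
  induction l with
  | nil => rfl
  | cons x t ih => simpa [pvSetD_replicate_zero] using ih

-- B's bucket-by-bucket fold flattened into one fold over ranks with A's formula as value
theorem pvFlatten (ord : List Int) (N bc : Int) (hbc : 1 ≤ bc) (hN : 0 < N) (hbcN : bc ≤ N) :
    ∀ (k : Nat) (c : Int), 1 ≤ c → c ≤ bc → (bc - c).toNat = k → ∀ (acc : List Int),
    (PySem.List.pyRange c bc 1).foldl
      (fun acc b =>
        (PySem.List.pyRange (pvCeil b N bc) (pvCeil (b + 1) N bc) 1).foldl
          (fun acc2 r => PySem.List.pySetD acc2 (PySem.List.pyGetD ord r 0) b) acc) acc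
    = (PySem.List.pyRange (pvCeil c N bc) N 1).foldl
        (fun acc2 r => PySem.List.pySetD acc2 (PySem.List.pyGetD ord r 0)
          (PySem.Int.floordiv (r * bc) N)) acc := by
  intro k
  induction k with
  | zero =>
    intro c hc1 hc2 hk acc
    have hceq : c = bc := by omega
    subst hceq
    rw [PySem.List.pyRange_one_eq_nil (by omega), pvCeil_bc (by omega),
      PySem.List.pyRange_one_eq_nil (by omega)]
    rfl
  | succ k ih =>
    intro c hc1 hc2 hk acc
    have hclt : c < bc := by omega
    rw [PySem.List.pyRange_one_cons hclt]
    simp only [List.foldl_cons]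
    rw [ih (c + 1) (by omega) (by omega) (by omega)]
    have hmono : pvCeil c N bc ≤ pvCeil (c + 1) N bc := pvCeil_mono (by omega) (by omega) (by omega)
    have hup : pvCeil (c + 1) N bc ≤ N := by
      have := pvCeil_mono (N := N) (bc := bc) (by omega) (by omega) (show c + 1 ≤ bc by omega)
      rw [pvCeil_bc (by omega)] at this
      exact this
    rw [PySem.List.pyRange_one_append (pvCeil c N bc) (pvCeil (c + 1) N bc) N hmono hup,
      List.foldl_append]
    congr 1
    apply PySem.List.foldl_congr_mem
    intro acc2 r hr
    rw [PySem.List.mem_pyRange_one] at hr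
    rw [pvFdiv_eq_of_range (by omega) hN hr.1 hr.2]

-- the two folds agree given any rank→index list of the right length
theorem pvFold_eq (ord : List Int) (n : Nat) (bc : Int)
    (hord : ord.length = n) (hbc : 1 ≤ bc) (hn : bc ≤ (n : Int)) (hn2 : 0 < n) :
    (PySem.List.enumerate ord 0).foldl
      (fun acc p =>
        PySem.List.pySetD acc p.2 (min (bc - 1) (PySem.Int.floordiv (p.1 * bc) (n : Int))))
      (List.replicate n (0 : Int))
    = (PySem.List.pyRange 1 bc 1).foldl
        (fun acc b =>
          (PySem.List.pyRange (pvCeil b (n : Int) bc) (pvCeil (b + 1) (n : Int) bc) 1).foldl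
            (fun acc2 r => PySem.List.pySetD acc2 (PySem.List.pyGetD ord r 0) b) acc)
        (List.replicate n (0 : Int)) := by
  have hN : (0 : Int) < (n : Int) := by exact_mod_cast hn2
  rw [PySem.List.enumerate_eq_map_pyRange ord 0, List.foldl_map]
  simp only [PySem.List.len_eq, hord]
  have hc1_lb : (1 : Int) ≤ pvCeil 1 (n : Int) bc := by
    have h := (pvCeil_bracket (N := (n : Int)) (bc := bc) (by omega) 1).2
    by_contra hcon
    push_neg at hcon
    have hle : pvCeil 1 (n : Int) bc ≤ 0 := by omega
    nlinarith
  have hc1_ub : pvCeil 1 (n : Int) bc ≤ (n : Int) := by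
    have := pvCeil_mono (N := (n : Int)) (bc := bc) (by omega) (by omega) hbc
    rw [pvCeil_bc (by omega)] at this
    exact this
  have hclamp :
      List.foldl (fun acc j => PySem.List.pySetD acc (PySem.List.pyGetD ord j 0)
          (min (bc - 1) (PySem.Int.floordiv (j * bc) (n : Int))))
        (List.replicate n (0 : Int)) (PySem.List.pyRange 0 (n : Int) 1)
      = List.foldl (fun acc j => PySem.List.pySetD acc (PySem.List.pyGetD ord j 0)
          (PySem.Int.floordiv (j * bc) (n : Int)))
        (List.replicate n (0 : Int)) (PySem.List.pyRange 0 (n : Int) 1) := by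
    apply PySem.List.foldl_congr_mem
    intro acc j hj
    rw [PySem.List.mem_pyRange_one] at hj
    have hlt : PySem.Int.floordiv (j * bc) (n : Int) < bc := by
      rw [PySem.Int.floordiv_lt_iff_lt_mul hN]
      nlinarith [hj.1, hj.2]
    rw [min_eq_right (by omega)]
  rw [hclamp,
    PySem.List.pyRange_one_append 0 (pvCeil 1 (n : Int) bc) (n : Int) (by omega) hc1_ub,
    List.foldl_append]
  have hprefix :
      List.foldl (fun acc j => PySem.List.pySetD acc (PySem.List.pyGetD ord j 0)
          (PySem.Int.floordiv (j * bc) (n : Int)))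
        (List.replicate n (0 : Int)) (PySem.List.pyRange 0 (pvCeil 1 (n : Int) bc) 1)
      = List.replicate n (0 : Int) := by
    have hz :
        List.foldl (fun acc j => PySem.List.pySetD acc (PySem.List.pyGetD ord j 0)
            (PySem.Int.floordiv (j * bc) (n : Int)))
          (List.replicate n (0 : Int)) (PySem.List.pyRange 0 (pvCeil 1 (n : Int) bc) 1)
        = List.foldl (fun acc j => PySem.List.pySetD acc (PySem.List.pyGetD ord j 0) 0)
          (List.replicate n (0 : Int)) (PySem.List.pyRange 0 (pvCeil 1 (n : Int) bc) 1) := by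
      apply PySem.List.foldl_congr_mem
      intro acc j hj
      rw [PySem.List.mem_pyRange_one] at hj
      have h0 : pvCeil 0 (n : Int) bc ≤ j := by
        rw [pvCeil_le_iff (by omega)]
        nlinarith [hj.1]
      have h1 : j < pvCeil (0 + 1) (n : Int) bc := by
        have h2 := hj.2
        norm_num
        exact h2
      rw [pvFdiv_eq_of_range (by omega) hN h0 h1]
    rw [hz]
    exact pvFold_zero ord _ n
  rw [hprefix, pvFlatten ord (n : Int) bc hbc hN hn (bc - 1).toNat 1 (by omega) hbc rfl]

-- ===== VERDICT (by name: the statement is the Claim_ definition above) =====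
theorem assign_length_buckets_spec : Claim_equal_assign_length_buckets := by
  intro values num_buckets _ hpre
  unfold Spec_assign_length_buckets assign_length_buckets assign_length_buckets_alt
  by_cases hnil : values = []
  · simp [hnil]
  · simp only [hnil, if_false]
    by_cases hguard : values.length = 1 ∨ (PySem.Set.ofList values).length = 1
    · simp [hguard]
    · simp only [hguard, if_false]
      have hn2 : 0 < values.length := by
        cases values with
        | nil => exact absurd rfl hnil
        | cons a t => simp
      have hlen : (PySem.List.sorted2 (PySem.List.pyRange 0 (values.length : Int) 1)
          (fun idx => PySem.List.pyGetD values idx 0) (fun idx => idx) false).length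
          = values.length := by
        rw [(PySem.List.sorted2_perm _ _ _ _).length_eq, PySem.List.length_pyRange_one]
        omega
      have hbc1 : 1 ≤ min num_buckets (values.length : Int) := by
        have : (1 : Int) ≤ (values.length : Int) := by exact_mod_cast hn2
        exact le_min hpre this
      have hbcn : min num_buckets (values.length : Int) ≤ (values.length : Int) :=
        min_le_right _ _
      exact pvFold_eq _ values.length _ hlen hbc1 hbcn hn2
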